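-- pv_equiv track=rewrite | github.com/kston83/cvss-te | code/process_nvd.py | get_primary_metric
-- ===== SOURCE A (Python) =====
-- def get_primary_metric(metrics_array):
--     """
--     Extract primary CVSS metric from array of metrics.
--
--     Prefers metrics in this order:
--     1. Type = 'Primary'
--     2. Source = 'nvd@nist.gov'
--     3. First entry in array
--
--     Args:
--         metrics_array (list): Array of CVSS metric objects
--
--     Returns:
--         dict: Selected metric object, or None if array is empty
--     """
--     if not metrics_array:
--         return None
--
--     # Prefer Primary type
--     primary = [m for m in metrics_array if m.get('type') == 'Primary']
--     if primary:
--         return primary[0]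
--
--     # Prefer nvd@nist.gov source
--     nvd_source = [m for m in metrics_array if 'nvd@nist.gov' in m.get('source', '')]
--     if nvd_source:
--         return nvd_source[0]
--
--     # Fallback to first entry
--     return metrics_array[0]
-- ===== SOURCE B (Python) =====
-- def get_primary_metric(metrics_array):
--     """Single-pass selection: return the first 'Primary' metric immediately;
--     otherwise remember the first nvd@nist.gov-sourced metric; fall back to the
--     first entry."""
--     if not metrics_array:
--         return None
--     first_nvd = None
--     for m in metrics_array:
--         if m.get('type') == 'Primary':
--             return m
--         if first_nvd is None and 'nvd@nist.gov' in m.get('source', ''):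
--             first_nvd = m
--     return first_nvd if first_nvd is not None else metrics_array[0]
-- ===== Notes on version B (the rewrite author's own statement) =====
-- stated objective: simpler
-- what changed: Replaced the two full filtering passes (build a 'Primary' list, then an 'nvd@nist.gov' list) with one short-circuiting scan that returns a Primary metric on sight and carries the first nvd-sourced candidate in an accumulator.
import Mathlib
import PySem

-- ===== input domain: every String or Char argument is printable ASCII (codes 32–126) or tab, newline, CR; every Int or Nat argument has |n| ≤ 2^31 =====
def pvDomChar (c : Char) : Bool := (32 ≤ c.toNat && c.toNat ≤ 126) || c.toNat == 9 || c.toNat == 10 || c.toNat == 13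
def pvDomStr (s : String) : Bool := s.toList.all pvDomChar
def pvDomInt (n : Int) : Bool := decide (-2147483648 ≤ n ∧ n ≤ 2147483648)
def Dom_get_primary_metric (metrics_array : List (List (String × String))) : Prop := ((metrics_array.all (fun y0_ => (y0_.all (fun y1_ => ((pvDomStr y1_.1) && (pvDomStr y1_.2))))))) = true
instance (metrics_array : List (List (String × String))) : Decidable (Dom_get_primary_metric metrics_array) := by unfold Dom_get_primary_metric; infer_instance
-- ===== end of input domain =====

-- B replaces A's two full filter passes with one short-circuiting scan carrying the first nvd-sourced candidate (objective: simpler).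

-- ===== PORT A =====
-- m.get(k): first-match association lookup (dict lookup; None if absent)
def pvGet (m : List (String × String)) (k : String) : Option String :=
  (m.find? (fun p => p.1 == k)).map (·.2)

-- predicate of A's first comprehension: m.get('type') == 'Primary'
def pvIsPrimary (m : List (String × String)) : Bool :=
  pvGet m "type" == some "Primary"

-- predicate of A's second comprehension: 'nvd@nist.gov' in m.get('source', '')
def pvIsNvd (m : List (String × String)) : Bool :=
  PySem.Str.isIn "nvd@nist.gov" ((pvGet m "source").getD "")

def get_primary_metric (metrics_array : List (List (String × String))) : Option (List (String × String)) :=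
  match metrics_array with
  | [] => none
  | m0 :: _ =>
    let primary := metrics_array.filter pvIsPrimary
    match primary with
    | p :: _ => some p
    | [] =>
      let nvd_source := metrics_array.filter pvIsNvd
      match nvd_source with
      | q :: _ => some q
      | [] => some m0

-- ===== PORT B =====
-- the single loop of Source B: return on Primary, carry the first nvd candidate
def altGo (ms : List (List (String × String))) (firstNvd : Option (List (String × String))) :
    Option (List (String × String)) :=
  match ms with
  | [] => firstNvd
  | m :: rest =>
    if pvIsPrimary m then some m
    else if firstNvd.isNone && pvIsNvd m then altGo rest (some m)
    else altGo rest firstNvd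

def get_primary_metric_alt (metrics_array : List (List (String × String))) : Option (List (String × String)) :=
  match metrics_array with
  | [] => none
  | m0 :: _ =>
    match altGo metrics_array none with
    | some r => some r
    | none => some m0

-- ===== PRECONDITION & SPEC =====
def Spec_get_primary_metric (metrics_array : List (List (String × String))) (out : Option (List (String × String))) : Prop := out = get_primary_metric_alt metrics_array
instance (metrics_array : List (List (String × String))) (out : Option (List (String × String))) : Decidable (Spec_get_primary_metric metrics_array out) := by unfold Spec_get_primary_metric; infer_instance

-- ===== CLAIM (what is proved, stated in full; the proofs are below) =====
def Claim_equal_get_primary_metric : Prop := ∀ (metrics_array : List (List (String × String))), Dom_get_primary_metric metrics_array → Spec_get_primary_metric metrics_array (get_primary_metric metrics_array)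

-- ===== LEMMAS AND PROOFS =====

-- loop invariant: altGo returns the first Primary if any, else the carried
-- candidate if set, else the first nvd-sourced metric of the suffix
theorem altGo_eq (ms : List (List (String × String))) (fnd : Option (List (String × String))) :
    altGo ms fnd = ((ms.filter pvIsPrimary).head?).or (fnd.or ((ms.filter pvIsNvd).head?)) := by
  induction ms generalizing fnd with
  | nil => simp [altGo]
  | cons m rest ih =>
    by_cases hp : pvIsPrimary m
    · simp [altGo, hp, List.filter_cons, Option.or]
    · by_cases hn : pvIsNvd m
      · cases fnd with
        | none => simp [altGo, hp, hn, ih, Option.or]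
        | some f => simp [altGo, hp, hn, ih, Option.or]
      · simp [altGo, hp, hn, ih]

theorem get_primary_metric_spec : Claim_equal_get_primary_metric := by
  intro ms _
  unfold Spec_get_primary_metric
  cases ms with
  | nil => rfl
  | cons m0 rest =>
    simp only [get_primary_metric, get_primary_metric_alt, altGo_eq]
    cases hp : ((m0 :: rest).filter pvIsPrimary) with
    | cons p _ => simp
    | nil =>
      cases hn : ((m0 :: rest).filter pvIsNvd) with
      | cons q _ => simp [hn, Option.or]
      | nil => simp [hn, Option.or]
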